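-- pv_equiv track=rewrite | github.com/feadoor/advent-of-code-2018 | 6.py | get_closest_point_idx
-- ===== SOURCE A (Python) =====
-- def distance(p1, p2):
--     return abs(p1[0] - p2[0]) + abs(p1[1] - p2[1])
--
-- def get_closest_point_idx(p, points):
--     min_val, min_idx = float("inf"), None
--     distances = [distance(p, pt) for pt in points]
--     for i, d in enumerate(distances):
--         if d < min_val:
--             min_val, min_idx = d, i
--         elif d == min_val:
--             min_idx = None
--     return min_idx
-- ===== SOURCE B (Python) =====
-- def distance(p1, p2):
--     return abs(p1[0] - p2[0]) + abs(p1[1] - p2[1])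
--
-- def get_closest_point_idx(p, points):
--     distances = [distance(p, pt) for pt in points]
--     if not distances:
--         return None
--     m = min(distances)
--     if distances.count(m) == 1:
--         return distances.index(m)
--     return None
-- ===== Notes on version B (the rewrite author's own statement) =====
-- stated objective: simpler
-- what changed: Replaces the single running-min-with-tie-flag loop over enumerate by a min/count/index decomposition: compute all distances, take the minimum, return its index iff it occurs exactly once.
import Mathlib
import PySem

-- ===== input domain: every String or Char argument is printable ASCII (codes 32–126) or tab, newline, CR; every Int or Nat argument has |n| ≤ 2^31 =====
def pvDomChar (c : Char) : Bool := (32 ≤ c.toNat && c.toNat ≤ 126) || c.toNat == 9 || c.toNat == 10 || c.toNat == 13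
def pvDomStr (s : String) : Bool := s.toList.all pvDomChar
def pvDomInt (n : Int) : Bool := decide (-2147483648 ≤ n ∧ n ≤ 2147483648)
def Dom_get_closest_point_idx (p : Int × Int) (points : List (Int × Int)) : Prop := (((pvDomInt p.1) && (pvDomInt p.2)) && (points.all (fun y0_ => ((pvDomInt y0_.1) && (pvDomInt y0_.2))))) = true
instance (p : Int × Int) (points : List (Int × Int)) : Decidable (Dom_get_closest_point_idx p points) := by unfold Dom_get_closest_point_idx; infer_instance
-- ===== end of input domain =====

-- B replaces A's running-min-with-tie-flag loop by a min/count/index decomposition (simpler; same cost).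


-- ===== PORT A =====
-- helper `distance` (shared by both Python sources verbatim)
def pvDistance (p1 p2 : Int × Int) : Int := |p1.1 - p2.1| + |p1.2 - p2.2|

-- the for-loop over enumerate(distances): state (min_val : Option Int with none = inf, min_idx)
def pvLoopA : List Int → Int → Option Int → Option Int → Option Int
  | [], _, _, mi => mi
  | d :: rest, i, mv, mi =>
    match mv with
    | none => pvLoopA rest (i + 1) (some d) (some i)
    | some m =>
      if d < m then pvLoopA rest (i + 1) (some d) (some i)
      else if d = m then pvLoopA rest (i + 1) (some m) none
      else pvLoopA rest (i + 1) (some m) mi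

def get_closest_point_idx (p : Int × Int) (points : List (Int × Int)) : Option Int :=
  pvLoopA (points.map (pvDistance p)) 0 none none

-- ===== PORT B =====
def get_closest_point_idx_alt (p : Int × Int) (points : List (Int × Int)) : Option Int :=
  let distances := points.map (pvDistance p)
  match PySem.List.min? distances (fun x => x) with
  | none => none
  | some m =>
    if PySem.List.count distances m = 1 then
      (PySem.List.index? distances m).map (fun n => (n : Int))
    else none

-- ===== PRECONDITION & SPEC =====
def Spec_get_closest_point_idx (p : Int × Int) (points : List (Int × Int)) (out : Option Int) : Prop := out = get_closest_point_idx_alt p points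
instance (p : Int × Int) (points : List (Int × Int)) (out : Option Int) : Decidable (Spec_get_closest_point_idx p points out) := by unfold Spec_get_closest_point_idx; infer_instance

-- ===== CLAIM (what is proved, stated in full; the proofs are below) =====
def Claim_equal_get_closest_point_idx : Prop := ∀ (p : Int × Int) (points : List (Int × Int)), Dom_get_closest_point_idx p points → Spec_get_closest_point_idx p points (get_closest_point_idx p points)

-- ===== LEMMAS AND PROOFS =====

-- closed form for A's loop once the running minimum is finite
def pvAux (ds : List Int) (i m : Int) (mi : Option Int) : Option Int :=
  match PySem.List.min? ds (fun x => x) with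
  | none => mi
  | some r =>
    if m < r then mi
    else if r < m then
      (if PySem.List.count ds r = 1 then
        (PySem.List.index? ds r).map (fun n => (i + (n : Int))) else none)
    else none

theorem foldl_min_min (t : List Int) : ∀ a b : Int, t.foldl min (min a b) = min a (t.foldl min b) := by
  induction t with
  | nil => intro a b; simp
  | cons c t ih =>
    intro a b
    simp only [List.foldl_cons, min_assoc, ih]

theorem min?_id_cons' (d : Int) (rest : List Int) :
    PySem.List.min? (d :: rest) (fun x => x) =
      some (match PySem.List.min? rest (fun x => x) with
            | none => d
            | some r => min d r) := by
  cases rest with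
  | nil => rw [PySem.List.min?_id_cons]; simp [(PySem.List.min?_eq_none_iff ([] : List Int) (fun x => x)).mpr rfl]
  | cons r0 t =>
    rw [PySem.List.min?_id_cons, PySem.List.min?_id_cons]
    simp only [List.foldl_cons]
    rw [foldl_min_min]

theorem count_cons_ne_pv (d r : Int) (rest : List Int) (h : r ≠ d) :
    PySem.List.count (d :: rest) r = PySem.List.count rest r := by
  simp [PySem.List.count_eq, List.count_cons]
  omega

theorem count_cons_self_pv (d : Int) (rest : List Int) :
    PySem.List.count (d :: rest) d = PySem.List.count rest d + 1 := by
  simp [PySem.List.count_eq, List.count_cons]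

theorem loopA_some (ds : List Int) : ∀ (i m : Int) (mi : Option Int),
    pvLoopA ds i (some m) mi = pvAux ds i m mi := by
  induction ds with
  | nil =>
    intro i m mi
    simp [pvLoopA, pvAux, (PySem.List.min?_eq_none_iff ([] : List Int) (fun x => x)).mpr rfl]
  | cons d rest ih =>
    intro i m mi
    rcases hmr : PySem.List.min? rest (fun x => x) with _ | r
    · have hrest : rest = [] := (PySem.List.min?_eq_none_iff rest (fun x => x)).mp hmr
      subst hrest
      simp only [pvLoopA, pvAux, min?_id_cons', hmr]
      have hcount : PySem.List.count [d] d = 1 := by simp [PySem.List.count_eq]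
      by_cases h1 : d < m
      · rw [if_pos h1]
        simp [pvLoopA, if_neg (by omega : ¬ m < d), if_pos h1, hcount,
              PySem.List.index?_cons_self]
      · rw [if_neg h1]
        by_cases h2 : d = m
        · subst h2
          simp [pvLoopA]
        · rw [if_neg h2]
          simp [pvLoopA, if_pos (by omega : m < d)]
    · have hrmem : r ∈ rest := PySem.List.min?_mem hmr
      have hrmin : ∀ y ∈ rest, r ≤ y := fun y hy => PySem.List.min?_isMin hmr y hy
      simp only [pvLoopA, pvAux, min?_id_cons', hmr]
      by_cases h1 : d < m
      · rw [if_pos h1, ih, pvAux, hmr]; simp only []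
        by_cases hdr : d < r
        · rw [if_pos hdr, min_eq_left (le_of_lt hdr)]
          have hc0 : rest.count d = 0 := by
            rw [List.count_eq_zero]
            intro hd; exact absurd (hrmin d hd) (by omega)
          rw [if_neg (by omega : ¬ m < d), if_pos h1,
              if_pos (by simp [PySem.List.count_eq, List.count_cons, hc0]),
              PySem.List.index?_cons_self]
          simp
        · by_cases hrd : r < d
          · rw [if_neg (by omega : ¬ d < r), if_pos hrd, min_eq_right (le_of_lt hrd),
                if_neg (by omega : ¬ m < r), if_pos (by omega : r < m),
                count_cons_ne_pv d r rest (by omega),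
                PySem.List.index?_cons_of_ne rest (by omega : d ≠ r)]
            split_ifs <;> cases hix : PySem.List.index? rest r <;> simp [hix] <;> ring_nf
          · have hdr' : d = r := by omega
            subst hdr'
            rw [if_neg (by omega : ¬ d < d), if_neg (by omega : ¬ d < d), min_self,
                if_neg (by omega : ¬ m < d), if_pos (by omega : d < m)]
            have hc : 1 < PySem.List.count (d :: rest) d := by
              have : 0 < rest.count d := List.count_pos_iff.mpr hrmem
              rw [count_cons_self_pv]; simp [PySem.List.count_eq]; omega
            rw [if_neg (by omega)]
      · rw [if_neg h1]
        by_cases h2 : d = m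
        · subst h2
          rw [if_pos rfl, ih, pvAux, hmr]; simp only []
          by_cases hrd : r < d
          · rw [if_neg (by omega : ¬ d < r), if_pos hrd, min_eq_right (le_of_lt hrd),
                if_neg (by omega : ¬ d < r), if_pos hrd,
                count_cons_ne_pv d r rest (by omega),
                PySem.List.index?_cons_of_ne rest (by omega : d ≠ r)]
            split_ifs <;> cases hix : PySem.List.index? rest r <;> simp [hix] <;> ring_nf
          · by_cases hdr : d < r
            · rw [if_pos hdr, min_eq_left (le_of_lt hdr), if_neg (by omega : ¬ d < d),
                  if_neg (by omega : ¬ d < d)]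
            · have : d = r := by omega
              subst this
              rw [if_neg (by omega : ¬ d < d), if_neg (by omega : ¬ d < d), min_self,
                  if_neg (by omega : ¬ d < d), if_neg (by omega : ¬ d < d)]
        · rw [if_neg h2, ih, pvAux, hmr]; simp only []
          have hmd : m < d := by omega
          by_cases hmr' : m < r
          · rw [if_pos hmr', if_pos (lt_min hmd hmr')]
          · by_cases hrm : r < m
            · rw [if_neg (by omega : ¬ m < r), if_pos hrm,
                  min_eq_right (by omega : r ≤ d),
                  if_neg (by omega : ¬ m < r), if_pos hrm,
                  count_cons_ne_pv d r rest (by omega),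
                  PySem.List.index?_cons_of_ne rest (by omega : d ≠ r)]
              split_ifs <;> cases hix : PySem.List.index? rest r <;> simp [hix] <;> ring_nf
            · have : r = m := by omega
              subst this
              rw [if_neg (by omega : ¬ r < r), if_neg (by omega : ¬ r < r),
                  min_eq_right (by omega : r ≤ d),
                  if_neg (by omega : ¬ r < r), if_neg (by omega : ¬ r < r)]

theorem loopA_eq_alt (ds : List Int) :
    pvLoopA ds 0 none none =
      match PySem.List.min? ds (fun x => x) with
      | none => none
      | some m =>
        if PySem.List.count ds m = 1 then
          (PySem.List.index? ds m).map (fun n => (n : Int))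
        else none := by
  cases ds with
  | nil => simp [pvLoopA, (PySem.List.min?_eq_none_iff ([] : List Int) (fun x => x)).mpr rfl]
  | cons d rest =>
    simp only [pvLoopA]
    rw [loopA_some, pvAux, min?_id_cons']
    rcases hmr : PySem.List.min? rest (fun x => x) with _ | r
    · have hrest : rest = [] := (PySem.List.min?_eq_none_iff rest (fun x => x)).mp hmr
      subst hrest
      simp only []
      rw [if_pos (by simp [PySem.List.count_eq] : PySem.List.count [d] d = 1),
          PySem.List.index?_cons_self]
      simp
    · have hrmem : r ∈ rest := PySem.List.min?_mem hmr
      have hrmin : ∀ y ∈ rest, r ≤ y := fun y hy => PySem.List.min?_isMin hmr y hy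
      simp only []
      by_cases hdr : d < r
      · rw [if_pos hdr, min_eq_left (le_of_lt hdr)]
        have hc0 : rest.count d = 0 := by
          rw [List.count_eq_zero]
          intro hd; exact absurd (hrmin d hd) (by omega)
        rw [if_pos (by simp [PySem.List.count_eq, List.count_cons, hc0]),
            PySem.List.index?_cons_self]
        simp
      · by_cases hrd : r < d
        · rw [if_neg (by omega : ¬ d < r), if_pos hrd, min_eq_right (le_of_lt hrd),
              count_cons_ne_pv d r rest (by omega),
              PySem.List.index?_cons_of_ne rest (by omega : d ≠ r)]
          split_ifs <;> cases hix : PySem.List.index? rest r <;> simp [hix] <;> omega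
        · have : d = r := by omega
          subst this
          rw [if_neg (by omega : ¬ d < d), if_neg (by omega : ¬ d < d), min_self]
          have hc : 1 < PySem.List.count (d :: rest) d := by
            have : 0 < rest.count d := List.count_pos_iff.mpr hrmem
            rw [count_cons_self_pv]; simp [PySem.List.count_eq]; omega
          rw [if_neg (by omega)]

-- ===== VERDICT (by name: the statement is the Claim_ definition above) =====
theorem get_closest_point_idx_spec : Claim_equal_get_closest_point_idx := by
  intro p points _
  unfold Spec_get_closest_point_idx get_closest_point_idx get_closest_point_idx_alt
  exact loopA_eq_alt (points.map (pvDistance p))
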